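-- pv_equiv track=rewrite | github.com/d-genk/pubmeb-ventilation-terminology | pubmed_compare.py | generate_phrase_combinations
-- ===== SOURCE A (Python) =====
-- from itertools import combinations
--
-- def generate_phrase_combinations(phrases, max_combination_size=2, operator="AND"):
--     """
--     Build Boolean combinations of phrases using AND or OR.
--
--     Returns a list of tuples: (combined_search_string, [component_phrases])
--     """
--     operator = operator.upper()
--     assert operator in {"AND", "OR"}, "Operator must be 'AND' or 'OR'."
--     all_combos = []
--     for r in range(1, max_combination_size + 1):
--         for combo in combinations(phrases, r):
--             combined = f' {operator} '.join(f'"{p}"' for p in combo)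
--             all_combos.append((combined, combo))
--     return all_combos
-- ===== SOURCE B (Python) =====
-- def generate_phrase_combinations(phrases, max_combination_size=2, operator="AND"):
--     """
--     Build Boolean combinations of phrases using AND or OR.
--
--     Returns a list of tuples: (combined_search_string, [component_phrases])
--     """
--     operator = operator.upper()
--     assert operator in {"AND", "OR"}, "Operator must be 'AND' or 'OR'."
--     ph = list(phrases)
--     sep = ' ' + operator + ' '
--     out = []
--
--     def emit(start, remaining, built, combo):
--         # choose 'remaining' more phrases from positions >= start, threading
--         # the partially built quoted/joined string and the partial tuple
--         if remaining == 0: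
--             out.append((built, combo))
--             return
--         for j in range(start, len(ph) - remaining + 1):
--             q = '"' + ph[j] + '"'
--             emit(j + 1, remaining - 1,
--                  q if not combo else built + sep + q,
--                  combo + (ph[j],))
--
--     r = 1
--     while r <= max_combination_size:
--         emit(0, r, '', ())
--         r += 1
--     return out
-- ===== Notes on version B (the rewrite author's own statement) =====
-- stated objective: alternative
-- what changed: Replaces the itertools.combinations + per-combo join pipeline by a single recursive index-based enumerator that threads the partially built quoted/operator-joined string and the partial tuple through the recursion, so the join pass over each finished combination disappears.
import Mathlib
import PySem

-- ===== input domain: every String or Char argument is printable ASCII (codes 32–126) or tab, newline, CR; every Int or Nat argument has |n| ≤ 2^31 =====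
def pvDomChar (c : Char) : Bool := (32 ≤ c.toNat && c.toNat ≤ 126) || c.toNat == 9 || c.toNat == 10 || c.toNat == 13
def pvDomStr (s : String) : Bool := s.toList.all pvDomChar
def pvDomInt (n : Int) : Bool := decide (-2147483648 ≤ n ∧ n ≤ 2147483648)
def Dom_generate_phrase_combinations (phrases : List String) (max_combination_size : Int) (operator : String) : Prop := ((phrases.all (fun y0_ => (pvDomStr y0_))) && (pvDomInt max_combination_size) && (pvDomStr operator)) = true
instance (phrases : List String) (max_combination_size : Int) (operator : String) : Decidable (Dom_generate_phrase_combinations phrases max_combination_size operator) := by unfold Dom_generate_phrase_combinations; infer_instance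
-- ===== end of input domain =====

-- B replaces the itertools.combinations + per-combo join pipeline by one recursive
-- index-based enumerator threading the partially built string (objective: alternative).

-- ===== PORT A =====
-- itertools.combinations(xs, r) in itertools' emission order
def pvCombos : List String → Nat → List (List String)
  | _, 0 => [[]]
  | [], _ + 1 => []
  | x :: rest, r + 1 => ((pvCombos rest r).map (x :: ·)) ++ pvCombos rest (r + 1)

def generate_phrase_combinations (phrases : List String) (max_combination_size : Int) (operator : String) : List (String × List String) :=
  let operator := PySem.Str.upper operator
  -- the assert raises unless operator ∈ {"AND","OR"}; those inputs are outside Pre_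
  (PySem.List.pyRange 1 (max_combination_size + 1) 1).foldl
    (fun all_combos r =>
      all_combos ++ (pvCombos phrases r.toNat).map
        (fun combo =>
          (PySem.Str.join (" " ++ operator ++ " ") (combo.map (fun p => "\"" ++ p ++ "\"")), combo)))
    []

-- ===== PORT B =====
-- def emit(start, remaining, built, combo): …  (recursion over index positions)
def pvEmit (ph : List String) (sep : String) :
    Nat → Nat → String → List String → List (String × List String) → List (String × List String)
  | _, 0, built, combo, out => out ++ [(built, combo)]
  | start, remaining + 1, built, combo, out =>
      (List.range' start (ph.length - remaining - start)).foldl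
        (fun o j =>
          let q := "\"" ++ ph.getD j "" ++ "\""
          pvEmit ph sep (j + 1) remaining (if combo.isEmpty then q else built ++ sep ++ q)
            (combo ++ [ph.getD j ""]) o)
        out

-- while r <= max_combination_size: emit(0, r, '', ()); r += 1
def pvLoopB (ph : List String) (sep : String) (k : Int) (r : Int)
    (out : List (String × List String)) : List (String × List String) :=
  if r ≤ k then pvLoopB ph sep k (r + 1) (pvEmit ph sep 0 r.toNat "" [] out) else out
termination_by (k + 1 - r).toNat
decreasing_by omega

def generate_phrase_combinations_alt (phrases : List String) (max_combination_size : Int) (operator : String) : List (String × List String) :=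
  let operator := PySem.Str.upper operator
  pvLoopB phrases (" " ++ operator ++ " ") max_combination_size 1 []

-- ===== PRECONDITION & SPEC =====
-- Pre_ excludes exactly the inputs where A's assert raises (operator.upper() not 'AND'/'OR').
def Pre_generate_phrase_combinations (phrases : List String) (max_combination_size : Int) (operator : String) : Prop :=
  PySem.Str.upper operator = "AND" ∨ PySem.Str.upper operator = "OR"
instance (phrases : List String) (max_combination_size : Int) (operator : String) : Decidable (Pre_generate_phrase_combinations phrases max_combination_size operator) := by unfold Pre_generate_phrase_combinations; infer_instance

def pvWitness_generate_phrase_combinations : List String × Int × String := (["vent", "lung"], 2, "and")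

def Spec_generate_phrase_combinations (phrases : List String) (max_combination_size : Int) (operator : String) (out : List (String × List String)) : Prop := out = generate_phrase_combinations_alt phrases max_combination_size operator
instance (phrases : List String) (max_combination_size : Int) (operator : String) (out : List (String × List String)) : Decidable (Spec_generate_phrase_combinations phrases max_combination_size operator out) := by unfold Spec_generate_phrase_combinations; infer_instance

-- ===== CLAIM (what is proved, stated in full; the proofs are below) =====
def Claim_equal_generate_phrase_combinations : Prop := ∀ (phrases : List String) (max_combination_size : Int) (operator : String), Dom_generate_phrase_combinations phrases max_combination_size operator → Pre_generate_phrase_combinations phrases max_combination_size operator → Spec_generate_phrase_combinations phrases max_combination_size operator (generate_phrase_combinations phrases max_combination_size operator)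

-- ===== LEMMAS AND PROOFS =====

-- the string A builds for a finished combination
def pvJ (sep : String) (combo : List String) : String :=
  PySem.Str.join sep (combo.map (fun p => "\"" ++ p ++ "\""))

theorem pvJ_nil (sep : String) : pvJ sep [] = "" := by
  apply String.toList_inj.mp
  simp [pvJ, PySem.Str.join, PySem.Chars.join_nil]

theorem pvChars_join_snoc (sep cp : List Char) (l : List (List Char)) (h : l ≠ []) :
    PySem.Chars.join sep (l ++ [cp]) = PySem.Chars.join sep l ++ sep ++ cp := by
  induction l with
  | nil => exact absurd rfl h
  | cons a t ih =>
    cases t with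
    | nil => simp [PySem.Chars.join_cons_cons, PySem.Chars.join_singleton]
    | cons b t' =>
      have ih' := ih (by simp)
      rw [List.cons_append] at ih'
      simp only [List.cons_append]
      rw [PySem.Chars.join_cons_cons, ih', PySem.Chars.join_cons_cons]
      simp

theorem pvJ_singleton (sep : String) (p : String) :
    pvJ sep [p] = "\"" ++ p ++ "\"" := by
  apply String.toList_inj.mp
  simp [pvJ, PySem.Str.join, PySem.Chars.join_singleton]

theorem pvJ_snoc (sep : String) (l : List String) (p : String) (h : l ≠ []) :
    pvJ sep (l ++ [p]) = pvJ sep l ++ sep ++ ("\"" ++ p ++ "\"") := by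
  apply String.toList_inj.mp
  simp only [pvJ, PySem.Str.join, String.toList_ofList, List.map_append, List.map_cons,
    List.map_nil, String.toList_append]
  rw [pvChars_join_snoc _ _ _ (by simpa using h)]

theorem pvCombos_eq_nil :
    ∀ (xs : List String) (r : Nat), xs.length < r → pvCombos xs r = [] := by
  intro xs
  induction xs with
  | nil => intro r hr; cases r with
    | zero => omega
    | succ r => rfl
  | cons x rest ih =>
    intro r hr
    cases r with
    | zero => omega
    | succ r =>
      have h1 : rest.length < r := by simp at hr; omega
      simp [pvCombos, ih r h1, ih (r + 1) (by omega)]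

theorem pvEmit_spec (ph : List String) (sep : String) :
    ∀ (r start : Nat) (s : String) (combo : List String) (out : List (String × List String)),
      s = pvJ sep combo →
      pvEmit ph sep start r s combo out =
        out ++ (pvCombos (ph.drop start) r).map (fun c => (pvJ sep (combo ++ c), combo ++ c)) := by
  intro r
  induction r with
  | zero =>
    intro start s combo out hs
    simp [pvEmit, pvCombos, hs]
  | succ r ihr =>
    intro start s combo out hs
    -- inner induction on how many positions remain
    suffices aux : ∀ (n start : Nat), ph.length - start ≤ n →
        ∀ out, pvEmit ph sep start (r + 1) s combo out =
          out ++ (pvCombos (ph.drop start) (r + 1)).map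
            (fun c => (pvJ sep (combo ++ c), combo ++ c)) by
      exact aux _ start le_rfl out
    intro n
    induction n with
    | zero =>
      intro start hle out
      have hnil : pvCombos (ph.drop start) (r + 1) = [] :=
        pvCombos_eq_nil _ _ (by simp; omega)
      have hlen : ph.length - r - start = 0 := by omega
      simp [pvEmit, hlen, hnil]
    | succ n ihn =>
      intro start hle out
      by_cases hlt : start + r < ph.length
      · have hlt' : start < ph.length := by omega
        have hx : ph.getD start "" = ph[start] := List.getD_eq_getElem ph "" hlt'
        have hcount : ph.length - r - start = (ph.length - r - (start + 1)) + 1 := by omega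
        have hstep : ∀ o : List (String × List String),
            pvEmit ph sep start (r + 1) s combo o =
              pvEmit ph sep (start + 1) (r + 1) s combo
                (pvEmit ph sep (start + 1) r
                  (if combo.isEmpty then "\"" ++ ph.getD start "" ++ "\""
                   else s ++ sep ++ ("\"" ++ ph.getD start "" ++ "\""))
                  (combo ++ [ph.getD start ""]) o) := by
          intro o
          conv_lhs => rw [pvEmit, hcount, List.range'_succ]
          rw [List.foldl_cons, pvEmit]
        have hs' : (if combo.isEmpty then "\"" ++ ph.getD start "" ++ "\""
                    else s ++ sep ++ ("\"" ++ ph.getD start "" ++ "\"")) =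
            pvJ sep (combo ++ [ph.getD start ""]) := by
          cases combo with
          | nil =>
            rw [if_pos (show ([] : List String).isEmpty = true from rfl), List.nil_append,
              pvJ_singleton]
          | cons c0 cs =>
            rw [if_neg (by simp), pvJ_snoc sep (c0 :: cs) _ (by simp), hs]
        rw [hstep out, ihr (start + 1) _ _ _ hs', ihn (start + 1) (by omega)]
        rw [List.drop_eq_getElem_cons hlt']
        simp only [pvCombos, List.map_append, List.map_map, List.append_assoc, hx]
        congr 2
      · have hnil : pvCombos (ph.drop start) (r + 1) = [] :=
          pvCombos_eq_nil _ _ (by simp; omega)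
        have hlen : ph.length - r - start = 0 := by omega
        simp [pvEmit, hlen, hnil]

theorem pvLoop_spec (ph : List String) (sep : String) (k : Int) :
    ∀ (n : Nat) (r : Int) (out : List (String × List String)), (k + 1 - r).toNat = n →
      pvLoopB ph sep k r out =
        (PySem.List.pyRange r (k + 1) 1).foldl
          (fun acc ri => acc ++ (pvCombos ph ri.toNat).map (fun c => (pvJ sep c, c))) out := by
  intro n
  induction n using Nat.strong_induction_on with
  | _ n ihn =>
    intro r out hn
    rw [pvLoopB]
    by_cases hrk : r ≤ k
    · rw [if_pos hrk, PySem.List.pyRange_one_cons (by omega), List.foldl_cons,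
        ihn (k + 1 - (r + 1)).toNat (by omega) (r + 1) _ rfl]
      congr 1
      rw [pvEmit_spec ph sep r.toNat 0 "" [] out (pvJ_nil sep).symm]
      simp
    · rw [if_neg hrk, PySem.List.pyRange_one_eq_nil (by omega)]
      rfl

-- ===== VERDICT (by name: the statement is the Claim_ definition above) =====
theorem generate_phrase_combinations_spec : Claim_equal_generate_phrase_combinations := by
  intro phrases k operator _ _
  unfold Spec_generate_phrase_combinations generate_phrase_combinations generate_phrase_combinations_alt
  rw [pvLoop_spec phrases (" " ++ PySem.Str.upper operator ++ " ") k (k + 1 - 1).toNat 1 [] rfl]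
  rfl
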